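-- pv_equiv track=rewrite | github.com/541741106/IMPACT_HOI | tools/label_utils.py | infer_verb_noun
-- ===== SOURCE A (Python) =====
-- from typing import Iterable, List, Optional, Sequence, Tuple
--
-- DEFAULT_VERB_PREFIXES: Tuple[str, ...] = (
--     "pick_up",
--     "put_down",
--     "hand_tighten",
--     "hand_loosen",
--     "hand_spin",
--     "screw_on",
--     "tighten",
--     "loosen",
--     "remove",
--     "insert",
--     "mount",
--     "attach",
--     "detach",
--     "dismount",
--     "extract",
--     "place",
--     "store",
--     "transfer",
--     "hold",
--     "flip",
--     "thread",
--     "adjust",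
--     "align",
--     "seat",
--     "retrieve",
--     "install",
--     "unscrew",
--     "start",
--     "finish",
-- )
--
-- def infer_verb_noun(
--     label_name: str,
--     verb_candidates: Optional[Sequence[str]] = None,
-- ) -> Tuple[Optional[str], Optional[str]]:
--     name = str(label_name or "").strip().lower()
--     name = name.replace(" ", "_")
--     name = "_".join(part for part in name.split("_") if part)
--     if not name or name == "null":
--         return None, None
--     verbs = [str(v or "").strip().lower() for v in (verb_candidates or DEFAULT_VERB_PREFIXES)]
--     verbs = [v for v in verbs if v]
--     for verb in sorted(set(verbs), key=len, reverse=True):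
--         prefix = verb + "_"
--         if name.startswith(prefix):
--             noun = name[len(prefix) :]
--             return verb, (noun if noun else None)
--     if "_" in name:
--         verb, noun = name.split("_", 1)
--         return verb, (noun if noun else None)
--     return name, None
-- ===== SOURCE B (Python) =====
-- from typing import Optional, Sequence, Tuple
--
-- DEFAULT_VERB_PREFIXES: Tuple[str, ...] = (
--     "pick_up", "put_down", "hand_tighten", "hand_loosen", "hand_spin",
--     "screw_on", "tighten", "loosen", "remove", "insert", "mount", "attach",
--     "detach", "dismount", "extract", "place", "store", "transfer", "hold",
--     "flip", "thread", "adjust", "align", "seat", "retrieve", "install",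
--     "unscrew", "start", "finish",
-- )
--
-- def infer_verb_noun(
--     label_name: str,
--     verb_candidates: Optional[Sequence[str]] = None,
-- ) -> Tuple[Optional[str], Optional[str]]:
--     parts = [p for p in str(label_name or "").strip().lower().replace(" ", "_").split("_") if p]
--     if not parts or parts == ["null"]:
--         return None, None
--     vset = set()
--     for v in (verb_candidates or DEFAULT_VERB_PREFIXES):
--         w = str(v or "").strip().lower()
--         if w:
--             vset.add(w)
--     # single ascending sweep over the underscore boundaries of the normalized
--     # name, remembering the last (= longest) boundary whose prefix is a verb
--     best = 0
--     prefix = parts[0]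
--     for k in range(1, len(parts)):
--         if prefix in vset:
--             best = k
--         prefix = prefix + "_" + parts[k]
--     if best:
--         return "_".join(parts[:best]), "_".join(parts[best:])
--     return parts[0], ("_".join(parts[1:]) if len(parts) > 1 else None)
-- ===== Notes on version B (the rewrite author's own statement) =====
-- stated objective: alternative
-- what changed: Instead of sorting the cleaned verb list by length and scanning it with startswith, B builds a set of cleaned verbs with one fold and makes a single ascending sweep over the underscore boundaries of the normalized name, remembering the last (longest) boundary whose joined prefix is in the set, with a parts-based fallback.
import Mathlib
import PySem

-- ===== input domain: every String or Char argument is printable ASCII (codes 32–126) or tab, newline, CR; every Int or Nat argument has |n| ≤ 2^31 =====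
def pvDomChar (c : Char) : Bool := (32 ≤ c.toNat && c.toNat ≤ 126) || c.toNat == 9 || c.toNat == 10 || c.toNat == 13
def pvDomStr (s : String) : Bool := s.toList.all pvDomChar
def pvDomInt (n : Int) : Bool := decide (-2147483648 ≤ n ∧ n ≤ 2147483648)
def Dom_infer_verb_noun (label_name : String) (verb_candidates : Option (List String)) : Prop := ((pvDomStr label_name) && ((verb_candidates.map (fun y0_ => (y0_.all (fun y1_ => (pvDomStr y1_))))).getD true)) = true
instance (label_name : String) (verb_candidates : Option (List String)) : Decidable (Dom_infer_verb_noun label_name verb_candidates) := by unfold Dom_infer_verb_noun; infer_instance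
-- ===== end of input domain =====

-- B replaces A's length-sorted scan of the verb list (startswith per verb) by one ascending
-- sweep over the underscore boundaries of the normalized name, remembering the last boundary
-- whose prefix lies in a set of cleaned verbs, with a parts-based fallback (objective: alternative).

-- ===== PORT A =====
def DEFAULT_VERB_PREFIXES : List String :=
  ["pick_up", "put_down", "hand_tighten", "hand_loosen", "hand_spin", "screw_on",
   "tighten", "loosen", "remove", "insert", "mount", "attach", "detach", "dismount",
   "extract", "place", "store", "transfer", "hold", "flip", "thread", "adjust",
   "align", "seat", "retrieve", "install", "unscrew", "start", "finish"]

-- A's 'for verb in sorted(...)' loop with its early return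
def pvLoopA (name : String) : List String → Option (Option String × Option String)
  | [] => none
  | verb :: rest =>
    if PySem.Str.startswith name (verb ++ "_") then
      some (some verb,
        if PySem.Str.slice name (some (PySem.Str.len (verb ++ "_"))) none ≠ "" then
          some (PySem.Str.slice name (some (PySem.Str.len (verb ++ "_"))) none)
        else none)
    else pvLoopA name rest

def infer_verb_noun (label_name : String) (verb_candidates : Option (List String)) : Option String × Option String :=
  let name0 := PySem.Str.replace (PySem.Str.lower (PySem.Str.strip label_name)) " " "_"
  let parts := ((PySem.Str.split? name0 "_").getD []).filter (fun p => p ≠ "")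
  let name := PySem.Str.join "_" parts
  if name = "" ∨ name = "null" then (none, none)
  else
    let cands : List String :=
      match verb_candidates with
      | some (c :: cs) => c :: cs
      | _ => DEFAULT_VERB_PREFIXES
    let verbs := (cands.map (fun v => PySem.Str.lower (PySem.Str.strip v))).filter (fun v => v ≠ "")
    match pvLoopA name (PySem.List.sorted (PySem.Set.ofList verbs) (fun v => PySem.Str.len v) true) with
    | some r => r
    | none =>
      if PySem.Str.isIn "_" name then
        match (PySem.Str.splitMax? name "_" 1).getD [] with
        | verb :: noun :: _ => (some verb, if noun ≠ "" then some noun else none)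
        | _ => (none, none)   -- unreachable: '_' in name gives exactly two pieces
      else (some name, none)

-- ===== PORT B =====
-- B's 'for k in range(1, len(parts))' sweep: pref is the joined prefix at boundary k,
-- best the last boundary whose prefix was in the verb set
def pvBestK (vset : PySem.Set String) : List String → String → Nat → Nat → Nat
  | [], _, _, best => best
  | p :: rest, pref, k, best =>
    pvBestK vset rest (pref ++ "_" ++ p) (k + 1) (if pref ∈ vset then k else best)

def infer_verb_noun_alt (label_name : String) (verb_candidates : Option (List String)) : Option String × Option String :=
  let parts := ((PySem.Str.split? (PySem.Str.replace (PySem.Str.lower (PySem.Str.strip label_name)) " " "_") "_").getD []).filter (fun p => p ≠ "")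
  match parts with
  | [] => (none, none)
  | p0 :: rest =>
    if p0 = "null" ∧ rest = [] then (none, none)
    else
      let cs := verb_candidates.getD []
      let cands := if cs.isEmpty then DEFAULT_VERB_PREFIXES else cs
      let vset := cands.foldl
        (fun s v =>
          let w := PySem.Str.lower (PySem.Str.strip v)
          if w ≠ "" then PySem.Set.add s w else s) PySem.Set.empty
      let best := pvBestK vset rest p0 1 0
      if best ≠ 0 then
        (some (PySem.Str.join "_" ((p0 :: rest).take best)),
         some (PySem.Str.join "_" ((p0 :: rest).drop best)))
      else (some p0, if rest = [] then none else some (PySem.Str.join "_" rest))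

-- ===== PRECONDITION & SPEC =====
def Spec_infer_verb_noun (label_name : String) (verb_candidates : Option (List String)) (out : Option String × Option String) : Prop := out = infer_verb_noun_alt label_name verb_candidates
instance (label_name : String) (verb_candidates : Option (List String)) (out : Option String × Option String) : Decidable (Spec_infer_verb_noun label_name verb_candidates out) := by unfold Spec_infer_verb_noun; infer_instance

-- ===== CLAIM (what is proved, stated in full; the proofs are below) =====
def Claim_equal_infer_verb_noun : Prop := ∀ (label_name : String) (verb_candidates : Option (List String)), Dom_infer_verb_noun label_name verb_candidates → Spec_infer_verb_noun label_name verb_candidates (infer_verb_noun label_name verb_candidates)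

-- ===== LEMMAS AND PROOFS =====

-- pieces produced by splitting on '_' contain no '_'
lemma pvSplitGo_no_sep (fuel : Nat) : ∀ (l cur : List Char) (acc : List (List Char)),
    l.length < fuel → (∀ p ∈ acc, '_' ∉ p) → '_' ∉ cur →
    ∀ p ∈ PySem.Chars.splitOn.go ['_'] fuel l cur acc, '_' ∉ p := by
  induction fuel with
  | zero => intro l cur acc hl; omega
  | succ f ih =>
    intro l cur acc hl hacc hcur
    match l with
    | [] =>
      rw [PySem.Chars.splitOn.go.eq_def]
      intro p hp
      simp only [List.mem_reverse, List.mem_cons] at hp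
      rcases hp with rfl | hp
      · simpa using hcur
      · exact hacc p hp
    | c :: rest =>
      rw [PySem.Chars.splitOn.go.eq_def]
      by_cases hpre : List.isPrefixOf ['_'] (c :: rest) = true
      · simp only [hpre, if_true]
        have hc : c = '_' := by
          simp [List.isPrefixOf] at hpre; exact hpre.symm
        refine ih _ [] _ (by simp at hl ⊢; omega) ?_ (by simp)
        intro p hp
        rcases List.mem_cons.mp hp with rfl | hp
        · simpa using hcur
        · exact hacc p hp
      · simp only [hpre]
        have hc : c ≠ '_' := by
          intro h; apply hpre; simp [List.isPrefixOf, h]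
        refine ih rest (c :: cur) acc (by simp at hl ⊢; omega) hacc ?_
        intro h
        rcases List.mem_cons.mp h with h | h
        · exact hc h.symm
        · exact hcur h

lemma pvSplitOn_no_sep (cs p : List Char) (h : p ∈ PySem.Chars.splitOn cs ['_']) : '_' ∉ p := by
  exact pvSplitGo_no_sep (cs.length + 1) cs [] [] (by omega) (by simp) (by simp) p h

lemma pvJoin_cons_ne (sep : List Char) (q : List Char) (t : List (List Char)) (hq : q ≠ []) :
    PySem.Chars.join sep (q :: t) ≠ [] := by
  cases t with
  | nil => rw [PySem.Chars.join_singleton]; exact hq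
  | cons r rs =>
    rw [PySem.Chars.join_cons_cons]
    simp [hq]

lemma pvJoin_cons_of_ne (sep : List Char) (q : List Char) (t : List (List Char)) (ht : t ≠ []) :
    PySem.Chars.join sep (q :: t) = q ++ sep ++ PySem.Chars.join sep t := by
  cases t with
  | nil => exact absurd rfl ht
  | cons r rs => exact PySem.Chars.join_cons_cons sep q r rs

-- splitting the join at an interior boundary
lemma pvJoin_take_drop (qs : List (List Char)) (k : Nat) (h1 : 1 ≤ k) (h2 : k < qs.length) :
    PySem.Chars.join ['_'] qs
      = PySem.Chars.join ['_'] (qs.take k) ++ '_' :: PySem.Chars.join ['_'] (qs.drop k) := by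
  induction qs generalizing k with
  | nil => simp at h2
  | cons q rest ih =>
    match k, h1 with
    | 1, _ =>
      have hrest : rest ≠ [] := by
        simp at h2
        intro h; subst h; simp at h2
      rw [pvJoin_cons_of_ne _ _ _ hrest]
      simp [PySem.Chars.join_singleton]
    | (k' + 2), _ =>
      have hk' : 1 ≤ k' + 1 := by omega
      have hk2 : k' + 1 < rest.length := by simp at h2; omega
      have hrest : rest ≠ [] := by intro h; subst h; simp at hk2
      have htk : rest.take (k' + 1) ≠ [] := by
        intro h
        rw [List.take_eq_nil_iff] at h
        rcases h with h | h
        · omega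
        · exact hrest h
      rw [List.take_succ_cons, List.drop_succ_cons]
      rw [pvJoin_cons_of_ne _ _ _ hrest, pvJoin_cons_of_ne _ _ _ htk]
      rw [ih (k' + 1) hk' hk2]
      simp

-- joined prefixes grow strictly with the boundary index
lemma pvJoin_take_len_lt (qs : List (List Char)) (k m : Nat) (hkm : k < m) (hm : m ≤ qs.length)
    (h1 : 1 ≤ k) :
    (PySem.Chars.join ['_'] (qs.take k)).length < (PySem.Chars.join ['_'] (qs.take m)).length := by
  have h2 : k < (qs.take m).length := by rw [List.length_take]; omega
  have := pvJoin_take_drop (qs.take m) k h1 h2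
  rw [List.take_take, min_eq_left (le_of_lt hkm)] at this
  rw [this]
  simp

lemma pvAlign_mp : ∀ (qs : List (List Char)), (∀ q ∈ qs, q ≠ []) → (∀ q ∈ qs, '_' ∉ q) →
    ∀ v : List Char, v ++ ['_'] <+: PySem.Chars.join ['_'] qs →
    ∃ k, 1 ≤ k ∧ k < qs.length ∧ v = PySem.Chars.join ['_'] (qs.take k) := by
  intro qs
  induction qs with
  | nil =>
    intro _ _ v h
    rw [PySem.Chars.join_nil] at h
    simp at h
  | cons q rest ih =>
    intro hne hnu v h
    cases rest with
    | nil =>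
      rw [PySem.Chars.join_singleton] at h
      exact absurd (h.subset (by simp)) (hnu q (by simp))
    | cons r rs =>
      rw [pvJoin_cons_of_ne _ _ _ (by simp)] at h
      rw [show q ++ ['_'] ++ PySem.Chars.join ['_'] (r :: rs)
            = q ++ '_' :: PySem.Chars.join ['_'] (r :: rs) from by simp] at h
      rcases Nat.lt_trichotomy v.length q.length with hlt | heq | hgt
      · exfalso
        have hq : v ++ ['_'] <+: q :=
          List.prefix_of_prefix_length_le h (List.prefix_append _ _) (by simp; omega)
        exact hnu q (by simp) (hq.subset (by simp))
      · have hv : v <+: q ++ '_' :: PySem.Chars.join ['_'] (r :: rs) :=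
          ((List.prefix_append v ['_']).trans h)
        have hvq : v = q :=
          (List.prefix_of_prefix_length_le hv (List.prefix_append _ _) (le_of_eq heq)).eq_of_length heq
        exact ⟨1, le_refl 1, by simp, by simp [hvq, PySem.Chars.join_singleton]⟩
      · have hv : v <+: q ++ '_' :: PySem.Chars.join ['_'] (r :: rs) :=
          ((List.prefix_append v ['_']).trans h)
        obtain ⟨w, rfl⟩ :=
          List.prefix_of_prefix_length_le (List.prefix_append _ _) hv (le_of_lt hgt)
        have hw : w ++ ['_'] <+: '_' :: PySem.Chars.join ['_'] (r :: rs) := by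
          rw [List.append_assoc] at h
          exact (List.prefix_append_right_inj q).mp h
        cases w with
        | nil => simp at hgt
        | cons c w' =>
          rcases List.cons_prefix_cons.mp hw with ⟨rfl, hw'⟩
          obtain ⟨k', hk1, hk2, rfl⟩ :=
            ih (fun x hx => hne x (by simp [hx])) (fun x hx => hnu x (by simp [hx])) w' hw'
          refine ⟨k' + 1, by omega, by simp at hk2 ⊢; omega, ?_⟩
          rw [List.take_succ_cons,
            pvJoin_cons_of_ne _ _ _ (by rw [ne_eq, List.take_eq_nil_iff]; simp; omega)]
          simp

-- a verb prefix of the normalized name must end on an underscore boundary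
lemma pvAlign (qs : List (List Char)) (hne : ∀ q ∈ qs, q ≠ []) (hnu : ∀ q ∈ qs, '_' ∉ q)
    (v : List Char) :
    v ++ ['_'] <+: PySem.Chars.join ['_'] qs
      ↔ ∃ k, 1 ≤ k ∧ k < qs.length ∧ v = PySem.Chars.join ['_'] (qs.take k) := by
  constructor
  · exact pvAlign_mp qs hne hnu v
  · rintro ⟨k, h1, h2, rfl⟩
    rw [pvJoin_take_drop qs k h1 h2]
    exact ⟨PySem.Chars.join ['_'] (qs.drop k), by simp⟩

lemma pvLoopA_none (name : String) (L : List String)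
    (h : ∀ w ∈ L, ¬ PySem.Str.startswith name (w ++ "_")) : pvLoopA name L = none := by
  induction L with
  | nil => rfl
  | cons v t ih =>
    simp only [pvLoopA]
    rw [if_neg (h v (by simp))]
    exact ih (fun w hw => h w (List.mem_cons_of_mem _ hw))

lemma pvLoopA_finds (name : String) (L : List String)
    (hpw : L.Pairwise (fun a b => PySem.Str.len b ≤ PySem.Str.len a))
    (v0 : String) (hv0 : v0 ∈ L) (hP0 : PySem.Str.startswith name (v0 ++ "_"))
    (hmax : ∀ w ∈ L, PySem.Str.startswith name (w ++ "_") → PySem.Str.len w ≤ PySem.Str.len v0)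
    (huni : ∀ w ∈ L, PySem.Str.startswith name (w ++ "_") → PySem.Str.len w = PySem.Str.len v0 → w = v0) :
    pvLoopA name L = some (some v0,
      if PySem.Str.slice name (some (PySem.Str.len (v0 ++ "_"))) none ≠ "" then
        some (PySem.Str.slice name (some (PySem.Str.len (v0 ++ "_"))) none)
      else none) := by
  induction L with
  | nil => cases hv0
  | cons v t ih =>
    rcases List.pairwise_cons.mp hpw with ⟨hhead, htail⟩
    by_cases hPv : PySem.Str.startswith name (v ++ "_") = true
    · have hveq : v = v0 := by
        rcases List.mem_cons.mp hv0 with rfl | hv0t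
        · rfl
        · exact huni v (by simp) hPv
            (le_antisymm (hmax v (by simp) hPv) (hhead v0 hv0t))
      subst hveq
      simp only [pvLoopA]
      rw [if_pos hPv]
    · have hv0t : v0 ∈ t := by
        rcases List.mem_cons.mp hv0 with rfl | h
        · exact absurd hP0 hPv
        · exact h
      simp only [pvLoopA]
      rw [if_neg hPv]
      exact ih htail hv0t
        (fun w hw hPw => hmax w (List.mem_cons_of_mem _ hw) hPw)
        (fun w hw hPw hlen => huni w (List.mem_cons_of_mem _ hw) hPw hlen)

-- join "_" [p] = p, at string level
lemma pvJoin_single (p : String) : PySem.Str.join "_" [p] = p := by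
  apply String.toList_inj.mp
  rw [PySem.Str.toList_join]
  exact PySem.Chars.join_singleton _ _

-- pushing one more part onto a joined prefix
lemma pvJoin_snoc (qs : List (List Char)) (c : List Char) (h : qs ≠ []) :
    PySem.Chars.join ['_'] (qs ++ [c]) = PySem.Chars.join ['_'] qs ++ '_' :: c := by
  induction qs with
  | nil => exact absurd rfl h
  | cons q t ih =>
    cases t with
    | nil =>
      rw [List.cons_append, List.nil_append, PySem.Chars.join_cons_cons,
        PySem.Chars.join_singleton, PySem.Chars.join_singleton]
      simp
    | cons r rs =>
      rw [List.cons_append, pvJoin_cons_of_ne _ _ _ (by simp),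
        pvJoin_cons_of_ne _ _ _ (by simp), ih (by simp)]
      simp

lemma pvJoin_push (parts : List String) (j : Nat) (h1 : 1 ≤ j) (h2 : j < parts.length) :
    PySem.Str.join "_" (parts.take j) ++ "_" ++ parts[j] = PySem.Str.join "_" (parts.take (j + 1)) := by
  apply String.toList_inj.mp
  rw [String.toList_append, String.toList_append, PySem.Str.toList_join, PySem.Str.toList_join,
    List.take_succ_eq_append_getElem h2, List.map_append]
  rw [show PySem.Chars.join "_".toList (List.map String.toList (parts.take j) ++ List.map String.toList [parts[j]])
        = PySem.Chars.join ['_'] (List.map String.toList (parts.take j) ++ [parts[j].toList]) from rfl,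
    pvJoin_snoc _ _ (by
      simp only [ne_eq, List.map_eq_nil_iff, List.take_eq_nil_iff, not_or]
      exact ⟨by omega, by intro h0; subst h0; simp at h2⟩)]
  simp

-- the ascending sweep returns its accumulator when no boundary from j on is in the set
lemma pvBestK_none (parts : List String) (vset : PySem.Set String) :
    ∀ (n j best : Nat), j + n = parts.length → 1 ≤ j →
    (∀ k, j ≤ k → k ≤ parts.length - 1 → PySem.Str.join "_" (parts.take k) ∉ vset) →
    pvBestK vset (parts.drop j) (PySem.Str.join "_" (parts.take j)) j best = best := by
  intro n
  induction n with
  | zero =>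
    intro j best hlen hj _
    have hd : parts.drop j = [] := List.drop_eq_nil_of_le (by omega)
    rw [hd]
    rfl
  | succ m ih =>
    intro j best hlen hj hno
    have hjl : j < parts.length := by omega
    rw [List.drop_eq_getElem_cons hjl]
    simp only [pvBestK]
    rw [if_neg (hno j (le_refl j) (by omega)), pvJoin_push parts j hj hjl]
    exact ih (j + 1) best (by omega) (by omega) (fun k hk1 hk2 => hno k (by omega) hk2)

-- the ascending sweep finds the greatest matching boundary
lemma pvBestK_finds (parts : List String) (vset : PySem.Set String) (k0 : Nat)
    (hk0 : PySem.Str.join "_" (parts.take k0) ∈ vset) (hk0l : k0 ≤ parts.length - 1)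
    (hmax : ∀ k, k0 < k → k ≤ parts.length - 1 → PySem.Str.join "_" (parts.take k) ∉ vset) :
    ∀ (n j best : Nat), j + n = parts.length → 1 ≤ j → j ≤ k0 →
    pvBestK vset (parts.drop j) (PySem.Str.join "_" (parts.take j)) j best = k0 := by
  intro n
  induction n with
  | zero => intro j best hlen hj hjk; omega
  | succ m ih =>
    intro j best hlen hj hjk
    have hjl : j < parts.length := by omega
    rw [List.drop_eq_getElem_cons hjl]
    simp only [pvBestK]
    rw [pvJoin_push parts j hj hjl]
    rcases Nat.eq_or_lt_of_le hjk with rfl | hlt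
    · rw [if_pos hk0]
      exact pvBestK_none parts vset m (j + 1) j (by omega) (by omega)
        (fun k hk1 hk2 => hmax k (by omega) hk2)
    · exact ih (j + 1) _ (by omega) (by omega) (by omega)

-- go of s.split('_', 1) on a '_'-free head
lemma pvSplitMaxDone : ∀ (fuel : Nat) (t : List Char) (acc : List (List Char)),
    PySem.Chars.splitOnMax.go ['_'] fuel 0 t [] acc = (t :: acc).reverse := by
  intro fuel t acc
  cases fuel with
  | zero => rw [PySem.Chars.splitOnMax.go.eq_def]; simp
  | succ f =>
    cases t with
    | nil => rw [PySem.Chars.splitOnMax.go.eq_def]; simp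
    | cons c r => rw [PySem.Chars.splitOnMax.go.eq_def]; simp

lemma pvSplitMaxGo : ∀ (pre : List Char), '_' ∉ pre →
    ∀ (fuel : Nat), pre.length < fuel → ∀ (t cur : List Char) (acc : List (List Char)),
    PySem.Chars.splitOnMax.go ['_'] fuel 1 (pre ++ '_' :: t) cur acc
      = acc.reverse ++ [cur.reverse ++ pre, t] := by
  intro pre
  induction pre with
  | nil =>
    intro _ fuel hf t cur acc
    cases fuel with
    | zero => omega
    | succ f =>
      rw [PySem.Chars.splitOnMax.go.eq_def]
      simp only [List.nil_append]
      rw [if_neg (by omega)]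
      rw [if_pos (by simp [List.isPrefixOf])]
      simp only [List.length_singleton, List.drop_succ_cons, List.drop_zero]
      rw [pvSplitMaxDone]
      simp
  | cons c p ih =>
    intro hnu fuel hf t cur acc
    have hc : c ≠ '_' := fun h => hnu (by simp [h])
    cases fuel with
    | zero => exact absurd hf (by omega)
    | succ f =>
      rw [PySem.Chars.splitOnMax.go.eq_def]
      simp only [List.cons_append]
      rw [if_neg (by omega)]
      rw [if_neg (by simp [List.isPrefixOf]; intro h; exact absurd h.symm hc)]
      rw [ih (fun h => hnu (by simp [h])) f (by simp only [List.length_cons] at hf; omega) t (c :: cur) acc]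
      simp

lemma pvSplitMax1 (p0 : String) (t : List Char) (hnu : '_' ∉ p0.toList) (name : String)
    (hname : name.toList = p0.toList ++ '_' :: t) :
    PySem.Str.splitMax? name "_" 1 = some [p0, String.ofList t] := by
  have h1 : PySem.Chars.splitMax? name.toList ['_'] 1
      = some (PySem.Chars.splitOnMax name.toList ['_'] 1) := by
    simp [PySem.Chars.splitMax?]
  have h2 : PySem.Chars.splitOnMax name.toList ['_'] 1 = [p0.toList, t] := by
    simp only [PySem.Chars.splitOnMax]
    rw [if_neg (by norm_num), hname]
    rw [show ((1 : Int)).toNat = 1 from rfl]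
    rw [pvSplitMaxGo p0.toList hnu _ (by simp) t [] []]
    simp
  rw [PySem.Str.splitMax?]
  rw [show ("_" : String).toList = ['_'] from rfl, h1, h2]
  simp [String.ofList_toList]

-- B's fold building the verb set is set(clean nonempty verbs)
lemma pvSetFold (l : List String) : ∀ (s : PySem.Set String),
    l.foldl (fun s v =>
        let w := PySem.Str.lower (PySem.Str.strip v)
        if w ≠ "" then PySem.Set.add s w else s) s
      = ((l.map (fun v => PySem.Str.lower (PySem.Str.strip v))).filter
          (fun v => v ≠ "")).foldl PySem.Set.add s := by
  induction l with
  | nil => intro s; simp only [List.foldl_nil, List.map_nil, List.filter_nil]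
  | cons v t ih =>
    intro s
    simp only [List.foldl_cons, List.map_cons, List.filter_cons]
    by_cases h : PySem.Str.lower (PySem.Str.strip v) = ""
    · simp only [h]
      rw [if_neg (by simp)]
      rw [show (decide ¬("" : String) = "") = false from by simp]
      simp only [Bool.false_eq_true, if_false]
      exact ih s
    · rw [if_pos (by simpa using h)]
      rw [show (decide ¬PySem.Str.lower (PySem.Str.strip v) = "") = true from by simpa using h]
      simp only [if_true, List.foldl_cons]
      exact ih _

lemma pvSetFold2 (l : List String) :
    l.foldl (fun s v =>
        let w := PySem.Str.lower (PySem.Str.strip v)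
        if w ≠ "" then PySem.Set.add s w else s) PySem.Set.empty
      = PySem.Set.ofList ((l.map (fun v => PySem.Str.lower (PySem.Str.strip v))).filter
          (fun v => v ≠ "")) := by
  rw [pvSetFold, PySem.Set.ofList_eq_foldl]
  rfl

-- the heart of the equivalence: A's body equals B's body over the same parts and cleaned verbs
set_option maxHeartbeats 1600000 in
lemma pvMain (p0 : String) (rest vs : List String)
    (hne : ∀ p ∈ p0 :: rest, p ≠ "") (hnu : ∀ p ∈ p0 :: rest, '_' ∉ p.toList) :
    (if PySem.Str.join "_" (p0 :: rest) = "" ∨ PySem.Str.join "_" (p0 :: rest) = "null" then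
       ((none, none) : Option String × Option String)
     else
       match pvLoopA (PySem.Str.join "_" (p0 :: rest))
           (PySem.List.sorted (PySem.Set.ofList vs) (fun v => PySem.Str.len v) true) with
       | some r => r
       | none =>
         if PySem.Str.isIn "_" (PySem.Str.join "_" (p0 :: rest)) then
           match (PySem.Str.splitMax? (PySem.Str.join "_" (p0 :: rest)) "_" 1).getD [] with
           | verb :: noun :: _ => (some verb, if noun ≠ "" then some noun else none)
           | _ => (none, none)
         else (some (PySem.Str.join "_" (p0 :: rest)), none))
    = (if p0 = "null" ∧ rest = [] then (none, none)
       else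
         if pvBestK (PySem.Set.ofList vs) rest p0 1 0 ≠ 0 then
           (some (PySem.Str.join "_" ((p0 :: rest).take (pvBestK (PySem.Set.ofList vs) rest p0 1 0))),
            some (PySem.Str.join "_" ((p0 :: rest).drop (pvBestK (PySem.Set.ofList vs) rest p0 1 0))))
         else (some p0, if rest = [] then none else some (PySem.Str.join "_" rest))) := by
  have hp0ne : p0 ≠ "" := hne p0 (by simp)
  have hp0nu : '_' ∉ p0.toList := hnu p0 (by simp)
  by_cases hnull : p0 = "null" ∧ rest = []
  · obtain ⟨rfl, rfl⟩ := hnull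
    rw [if_pos (Or.inr (by decide))]
    simp
  · have htl : ∀ k, (PySem.Str.join "_" ((p0 :: rest).take k)).toList
        = PySem.Chars.join ['_'] (((p0 :: rest).map String.toList).take k) := by
      intro k
      rw [PySem.Str.toList_join, List.map_take]
      rfl
    have hname : (PySem.Str.join "_" (p0 :: rest)).toList
        = PySem.Chars.join ['_'] ((p0 :: rest).map String.toList) := by
      rw [PySem.Str.toList_join]
      rfl
    have hne' : ∀ q ∈ (p0 :: rest).map String.toList, q ≠ [] := by
      intro q hq
      rcases List.mem_map.mp hq with ⟨p, hp, rfl⟩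
      intro h0
      exact hne p hp (String.toList_inj.mp h0)
    have hnu' : ∀ q ∈ (p0 :: rest).map String.toList, '_' ∉ q := by
      intro q hq
      rcases List.mem_map.mp hq with ⟨p, hp, rfl⟩
      exact hnu p hp
    have hnn : ¬ (PySem.Str.join "_" (p0 :: rest) = "" ∨ PySem.Str.join "_" (p0 :: rest) = "null") := by
      rintro (h | h)
      · have : (PySem.Str.join "_" (p0 :: rest)).toList = [] := by rw [h]; rfl
        rw [hname] at this
        exact pvJoin_cons_ne _ _ _ (fun h0 => hp0ne (String.toList_inj.mp h0)) (by simpa using this)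
      · cases rest with
        | nil => exact hnull ⟨by rw [← pvJoin_single p0, h], rfl⟩
        | cons r t =>
          have h' : (PySem.Str.join "_" (p0 :: r :: t)).toList = "null".toList := by rw [h]
          rw [hname] at h'
          have hmem : '_' ∈ ("null" : String).toList := by
            rw [← h', List.map_cons, pvJoin_cons_of_ne _ _ _ (by simp)]
            simp
          simp at hmem
    rw [if_neg hnn, if_neg hnull]
    have hstart : ∀ w : String,
        (PySem.Str.startswith (PySem.Str.join "_" (p0 :: rest)) (w ++ "_") = true)
          ↔ ∃ k, 1 ≤ k ∧ k < (p0 :: rest).length ∧ w = PySem.Str.join "_" ((p0 :: rest).take k) := by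
      intro w
      rw [PySem.Str.startswith_eq, PySem.Chars.startswith_iff, hname,
        show (w ++ "_").toList = w.toList ++ ['_'] from by rw [String.toList_append]; rfl,
        pvAlign ((p0 :: rest).map String.toList) hne' hnu' w.toList]
      constructor
      · rintro ⟨k, h1, h2, hv⟩
        exact ⟨k, h1, by simpa using h2, String.toList_inj.mp (by rw [hv, htl k])⟩
      · rintro ⟨k, h1, h2, rfl⟩
        exact ⟨k, h1, by simpa using h2, by rw [htl k]⟩
    have hlenJ : ∀ k, PySem.Str.len (PySem.Str.join "_" ((p0 :: rest).take k))
        = ((PySem.Chars.join ['_'] (((p0 :: rest).map String.toList).take k)).length : Int) := by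
      intro k
      rw [PySem.Str.len_eq, htl k]
    by_cases hex : ∃ k, 1 ≤ k ∧ k ≤ (p0 :: rest).length - 1
        ∧ PySem.Str.join "_" ((p0 :: rest).take k) ∈ PySem.Set.ofList vs
    · obtain ⟨k1, hk11, hk12, hk1Q⟩ := hex
      set Q : ℕ → Prop := fun k => PySem.Str.join "_" ((p0 :: rest).take k) ∈ PySem.Set.ofList vs
        with hQdef
      set k0 := Nat.findGreatest Q ((p0 :: rest).length - 1) with hk0def
      have hk0Q : Q k0 := Nat.findGreatest_spec hk12 hk1Q
      have hk01 : 1 ≤ k0 := le_trans hk11 (Nat.le_findGreatest hk12 hk1Q)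
      have hk0n : k0 ≤ (p0 :: rest).length - 1 := Nat.findGreatest_le _
      have hk0lt : k0 < (p0 :: rest).length := by simp at hk0n ⊢; omega
      have hbest : pvBestK (PySem.Set.ofList vs) rest p0 1 0 = k0 := by
        have := pvBestK_finds (p0 :: rest) (PySem.Set.ofList vs) k0 hk0Q hk0n
          (fun k hk1 hk2 => Nat.findGreatest_is_greatest hk1 hk2)
          ((p0 :: rest).length - 1) 1 0 (by simp [Nat.add_comm]) (le_refl 1) hk01
        simpa [pvJoin_single] using this
      have hAB : ∀ w : String,
          w ∈ PySem.List.sorted (PySem.Set.ofList vs) (fun v => PySem.Str.len v) true →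
          PySem.Str.startswith (PySem.Str.join "_" (p0 :: rest)) (w ++ "_") = true →
          ∃ k, 1 ≤ k ∧ k ≤ k0 ∧ w = PySem.Str.join "_" ((p0 :: rest).take k) := by
        intro w hw hPw
        obtain ⟨k, h1, h2, rfl⟩ := (hstart w).mp hPw
        have hQk : Q k := (PySem.List.mem_sorted _ _ _ _).mp hw
        exact ⟨k, h1, Nat.le_findGreatest (by simp at h2 ⊢; omega) hQk, rfl⟩
      rw [pvLoopA_finds (PySem.Str.join "_" (p0 :: rest)) _ (PySem.List.sorted_pairwise_rev _ _)
          (PySem.Str.join "_" ((p0 :: rest).take k0))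
          ((PySem.List.mem_sorted _ _ _ _).mpr hk0Q)
          ((hstart _).mpr ⟨k0, hk01, hk0lt, rfl⟩)
          (by
            intro w hw hPw
            obtain ⟨k, h1, h2, rfl⟩ := hAB w hw hPw
            rw [hlenJ, hlenJ]
            rcases Nat.eq_or_lt_of_le h2 with rfl | hlt
            · exact le_refl _
            · exact_mod_cast le_of_lt
                (pvJoin_take_len_lt ((p0 :: rest).map String.toList) k k0 hlt (by simpa using le_of_lt hk0lt) h1))
          (by
            intro w hw hPw hlen
            obtain ⟨k, h1, h2, rfl⟩ := hAB w hw hPw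
            rcases Nat.eq_or_lt_of_le h2 with rfl | hlt
            · rfl
            · exfalso
              rw [hlenJ, hlenJ] at hlen
              have := pvJoin_take_len_lt ((p0 :: rest).map String.toList) k k0 hlt (by simpa using le_of_lt hk0lt) h1
              omega)]
      have hsplit := pvJoin_take_drop ((p0 :: rest).map String.toList) k0 hk01 (by simpa using hk0lt)
      have hslice : PySem.Str.slice (PySem.Str.join "_" (p0 :: rest))
          (some (PySem.Str.len (PySem.Str.join "_" ((p0 :: rest).take k0) ++ "_"))) none
          = PySem.Str.join "_" ((p0 :: rest).drop k0) := by
        apply String.toList_inj.mp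
        rw [PySem.Str.toList_slice, PySem.Chars.slice_eq_listSlice,
          show PySem.Str.len (PySem.Str.join "_" ((p0 :: rest).take k0) ++ "_")
              = (((PySem.Str.join "_" ((p0 :: rest).take k0)).toList.length + 1 : Nat) : Int) from by
            rw [PySem.Str.len_eq, String.toList_append]; simp,
          PySem.List.slice_from _ (by positivity), hname, hsplit, Int.toNat_natCast, htl k0,
          show PySem.Chars.join ['_'] (((p0 :: rest).map String.toList).take k0) ++
                '_' :: PySem.Chars.join ['_'] (((p0 :: rest).map String.toList).drop k0)
              = (PySem.Chars.join ['_'] (((p0 :: rest).map String.toList).take k0) ++ ['_']) ++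
                PySem.Chars.join ['_'] (((p0 :: rest).map String.toList).drop k0) from by simp,
          show (PySem.Chars.join ['_'] (((p0 :: rest).map String.toList).take k0)).length + 1
              = (PySem.Chars.join ['_'] (((p0 :: rest).map String.toList).take k0) ++ ['_']).length from by
            simp,
          List.drop_left, PySem.Str.toList_join, List.map_drop]
        rfl
      have hk0ne : k0 ≠ 0 := by omega
      rw [hbest, if_pos hk0ne]
      dsimp only
      rw [hslice]
      have hdrop : (p0 :: rest).drop k0 ≠ [] := by
        rw [ne_eq, List.drop_eq_nil_iff]
        simp at hk0lt ⊢
        omega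
      obtain ⟨p, t, hpt⟩ := List.exists_cons_of_ne_nil hdrop
      have hpparts : p ∈ p0 :: rest := List.mem_of_mem_drop (by rw [hpt]; simp)
      rw [if_pos]
      intro hemp
      have : (PySem.Str.join "_" ((p0 :: rest).drop k0)).toList = [] := by rw [hemp]; rfl
      rw [PySem.Str.toList_join, hpt] at this
      exact pvJoin_cons_ne _ _ _ (fun h0 => hne p hpparts (String.toList_inj.mp h0)) (by simpa using this)
    · have hbest : pvBestK (PySem.Set.ofList vs) rest p0 1 0 = 0 := by
        have := pvBestK_none (p0 :: rest) (PySem.Set.ofList vs) ((p0 :: rest).length - 1) 1 0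
          (by simp [Nat.add_comm]) (le_refl 1)
          (fun k hk1 hk2 hQ => hex ⟨k, hk1, hk2, hQ⟩)
        simpa [pvJoin_single] using this
      rw [pvLoopA_none _ _ (by
        intro w hw hPw
        obtain ⟨k, h1, h2, rfl⟩ := (hstart w).mp hPw
        exact hex ⟨k, h1, by simp at h2 ⊢; omega, (PySem.List.mem_sorted _ _ _ _).mp hw⟩)]
      rw [hbest]
      simp only [ne_eq, not_true_eq_false, if_false]
      cases rest with
      | nil =>
        rw [if_neg (by
          intro hin
          have := (PySem.Str.isIn_iff_infix _ _).mp hin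
          rw [show ("_" : String).toList = ['_'] from rfl] at this
          have hm := (List.singleton_infix_iff '_' _).mp this
          rw [pvJoin_single] at hm
          exact hp0nu hm)]
        rw [pvJoin_single]
        simp
      | cons r t =>
        have hnmtl : (PySem.Str.join "_" (p0 :: r :: t)).toList
            = p0.toList ++ '_' :: PySem.Chars.join ['_'] ((r :: t).map String.toList) := by
          rw [hname, List.map_cons, pvJoin_cons_of_ne _ _ _ (by simp)]
          simp
        rw [if_pos (by
          apply (PySem.Str.isIn_iff_infix _ _).mpr
          rw [show ("_" : String).toList = ['_'] from rfl, hnmtl]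
          exact ⟨p0.toList, PySem.Chars.join ['_'] ((r :: t).map String.toList), by simp⟩)]
        rw [pvSplitMax1 p0 _ hp0nu _ hnmtl]
        have hofl : String.ofList (PySem.Chars.join ['_'] ((r :: t).map String.toList))
            = PySem.Str.join "_" (r :: t) := by
          rw [show PySem.Chars.join ['_'] ((r :: t).map String.toList)
                = (PySem.Str.join "_" (r :: t)).toList from by rw [PySem.Str.toList_join]; rfl]
          exact String.ofList_toList
        rw [hofl]
        dsimp only [Option.getD_some]
        rw [if_pos (by
          intro hemp
          have : (PySem.Str.join "_" (r :: t)).toList = [] := by rw [hemp]; rfl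
          rw [PySem.Str.toList_join] at this
          exact pvJoin_cons_ne _ _ _
            (fun h0 => hne r (by simp) (String.toList_inj.mp h0)) (by simpa using this))]
        simp

lemma pvParts_props (s : String) :
    ∀ p ∈ ((PySem.Str.split? s "_").getD []).filter (fun p => p ≠ ""), p ≠ "" ∧ '_' ∉ p.toList := by
  intro p hp
  rcases List.mem_filter.mp hp with ⟨hp1, hp2⟩
  refine ⟨by simpa using hp2, ?_⟩
  have hbridge := PySem.Str.split?_map s "_"
  have hsep : ("_" : String).toList = ['_'] := rfl
  rw [hsep] at hbridge
  rw [show PySem.Chars.split? s.toList ['_'] = some (PySem.Chars.splitOn s.toList ['_']) from by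
    simp [PySem.Chars.split?]] at hbridge
  rcases ho : PySem.Str.split? s "_" with _ | l
  · rw [ho] at hbridge; simp at hbridge
  · rw [ho] at hbridge
    simp only [Option.map_some] at hbridge
    have hl : List.map String.toList l = PySem.Chars.splitOn s.toList ['_'] := by
      simpa using hbridge
    rw [ho] at hp1
    simp only [Option.getD_some] at hp1
    have : p.toList ∈ PySem.Chars.splitOn s.toList ['_'] := by
      rw [← hl]; exact List.mem_map_of_mem hp1
    exact pvSplitOn_no_sep _ _ this

lemma pvCands_eq (vc : Option (List String)) :
    (match vc with
     | some (c :: cs) => c :: cs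
     | _ => DEFAULT_VERB_PREFIXES)
    = (if (vc.getD []).isEmpty then DEFAULT_VERB_PREFIXES else vc.getD []) := by
  rcases vc with _ | ⟨_ | ⟨c, cs⟩⟩ <;> rfl

-- ===== VERDICT (by name: the statement is the Claim_ definition above) =====
set_option maxHeartbeats 1000000 in
theorem infer_verb_noun_spec : Claim_equal_infer_verb_noun := by
  intro label_name verb_candidates _
  unfold Spec_infer_verb_noun infer_verb_noun infer_verb_noun_alt
  dsimp only
  rw [pvSetFold2, ← pvCands_eq verb_candidates]
  have hprops := pvParts_props (PySem.Str.replace (PySem.Str.lower (PySem.Str.strip label_name)) " " "_")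
  cases hp : ((PySem.Str.split? (PySem.Str.replace (PySem.Str.lower (PySem.Str.strip label_name)) " " "_") "_").getD []).filter (fun p => p ≠ "") with
  | nil =>
    rw [if_pos (Or.inl (by decide))]
  | cons p0 rest =>
    rw [hp] at hprops
    dsimp only
    exact pvMain p0 rest _ (fun p hq => (hprops p hq).1) (fun p hq => (hprops p hq).2)
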